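-- pv_equiv track=rewrite | github.com/phungthanhloan1996/ai-recon-agent | modules/endpoint_probe.py | _extract_path_indicators
-- ===== SOURCE A (Python) =====
-- from typing import Any, Dict, List
--
-- def _extract_path_indicators(path: str) -> List[str]:
--     """
--     Extract security-relevant indicators from URL path.
--
--     Returns:
--         List of indicator strings
--     """
--     indicators = []
--     path_lower = path.lower()
--
--     # Admin paths
--     if any(x in path_lower for x in ['admin', 'administrator', 'wp-admin', 'manager', 'console', 'dashboard']):
--         indicators.append('admin_path')
--
--     # Upload/file paths
--     if any(x in path_lower for x in ['upload', 'file', 'attachment', 'media', 'content']):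
--         indicators.append('file_access_path')
--
--     # API paths
--     if any(x in path_lower for x in ['/api/', '/v1/', '/v2/', '/v3/', '/graphql']):
--         indicators.append('api_path')
--
--     # Auth paths
--     if any(x in path_lower for x in ['login', 'signin', 'auth', 'authenticate', 'register', 'password']):
--         indicators.append('auth_path')
--
--     # Config/sensitive paths
--     if any(x in path_lower for x in ['.env', 'config', 'settings', 'database', 'wp-config']):
--         indicators.append('config_path')
--
--     # WordPress paths
--     if any(x in path_lower for x in ['wp-content', 'wp-includes', 'wp-json', 'wp-admin']):
--         indicators.append('wordpress_path')
--
--     # Debug/test paths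
--     if any(x in path_lower for x in ['debug', 'test', 'dev', 'staging', 'temp', 'tmp']):
--         indicators.append('debug_path')
--
--     # Backup files
--     if any(path_lower.endswith(x) for x in ['.bak', '.sql', '.tar', '.zip', '.backup']):
--         indicators.append('backup_file')
--
--     # Git/version control
--     if any(x in path_lower for x in ['.git', '.svn', '.hg']):
--         indicators.append('vcs_path')
--
--     return indicators
-- ===== SOURCE B (Python) =====
-- from typing import List
--
-- # Flat keyword -> tag index (substring keywords), suffix -> tag index, and canonical tag order.
-- _TAG_KEYWORDS = [
--     ('admin_path', ['admin', 'administrator', 'wp-admin', 'manager', 'console', 'dashboard']),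
--     ('file_access_path', ['upload', 'file', 'attachment', 'media', 'content']),
--     ('api_path', ['/api/', '/v1/', '/v2/', '/v3/', '/graphql']),
--     ('auth_path', ['login', 'signin', 'auth', 'authenticate', 'register', 'password']),
--     ('config_path', ['.env', 'config', 'settings', 'database', 'wp-config']),
--     ('wordpress_path', ['wp-content', 'wp-includes', 'wp-json', 'wp-admin']),
--     ('debug_path', ['debug', 'test', 'dev', 'staging', 'temp', 'tmp']),
--     ('vcs_path', ['.git', '.svn', '.hg']),
-- ]
-- _KEYWORD_INDEX = [(kw, tag) for tag, kws in _TAG_KEYWORDS for kw in kws]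
-- _SUFFIX_INDEX = [('.bak', 'backup_file'), ('.sql', 'backup_file'), ('.tar', 'backup_file'),
--                  ('.zip', 'backup_file'), ('.backup', 'backup_file')]
-- _ORDER = ['admin_path', 'file_access_path', 'api_path', 'auth_path', 'config_path',
--           'wordpress_path', 'debug_path', 'backup_file', 'vcs_path']
--
--
-- def _extract_path_indicators(path: str) -> List[str]:
--     p = path.lower()
--     matched = set()
--     # One left-to-right scan over the positions of the path: at each position,
--     # every keyword anchored there contributes its tag to the matched set.
--     for j in range(len(p)):
--         for kw, tag in _KEYWORD_INDEX:
--             if p.startswith(kw, j):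
--                 matched.add(tag)
--     for kw, tag in _SUFFIX_INDEX:
--         if p.endswith(kw):
--             matched.add(tag)
--     return [tag for tag in _ORDER if tag in matched]
-- ===== Notes on version B (the rewrite author's own statement) =====
-- stated objective: alternative
-- what changed: Instead of nine per-tag any()-substring checks, B makes one left-to-right scan over the positions of the lowered path against a flat keyword-to-tag index, collecting matched tags into a set, then emits the tags in canonical order; suffix keywords are checked once against the path end.
import Mathlib
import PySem

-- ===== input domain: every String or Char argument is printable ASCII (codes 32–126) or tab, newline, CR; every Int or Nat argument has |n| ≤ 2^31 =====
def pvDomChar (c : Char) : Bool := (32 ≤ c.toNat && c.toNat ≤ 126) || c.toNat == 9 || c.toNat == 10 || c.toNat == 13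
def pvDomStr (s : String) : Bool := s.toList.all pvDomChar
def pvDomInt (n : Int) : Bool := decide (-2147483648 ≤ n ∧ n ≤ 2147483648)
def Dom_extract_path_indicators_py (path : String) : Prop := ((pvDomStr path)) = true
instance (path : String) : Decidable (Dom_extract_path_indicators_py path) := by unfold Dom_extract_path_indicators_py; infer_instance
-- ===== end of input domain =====

-- B replaces A's nine per-tag any()-checks by a single left-to-right scan over the positions of the
-- lowered path against a flat keyword→tag index, collecting matched tags into a set and emitting
-- them in canonical order (objective: alternative scan-based algorithm, same result).

-- ===== PORT A =====
def extract_path_indicators_py (path : String) : List String :=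
  let path_lower := PySem.Str.lower path
  let indicators : List String := []
  let indicators := if (["admin", "administrator", "wp-admin", "manager", "console", "dashboard"]).any (fun x => PySem.Str.isIn x path_lower) then indicators ++ ["admin_path"] else indicators
  let indicators := if (["upload", "file", "attachment", "media", "content"]).any (fun x => PySem.Str.isIn x path_lower) then indicators ++ ["file_access_path"] else indicators
  let indicators := if (["/api/", "/v1/", "/v2/", "/v3/", "/graphql"]).any (fun x => PySem.Str.isIn x path_lower) then indicators ++ ["api_path"] else indicators
  let indicators := if (["login", "signin", "auth", "authenticate", "register", "password"]).any (fun x => PySem.Str.isIn x path_lower) then indicators ++ ["auth_path"] else indicators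
  let indicators := if ([".env", "config", "settings", "database", "wp-config"]).any (fun x => PySem.Str.isIn x path_lower) then indicators ++ ["config_path"] else indicators
  let indicators := if (["wp-content", "wp-includes", "wp-json", "wp-admin"]).any (fun x => PySem.Str.isIn x path_lower) then indicators ++ ["wordpress_path"] else indicators
  let indicators := if (["debug", "test", "dev", "staging", "temp", "tmp"]).any (fun x => PySem.Str.isIn x path_lower) then indicators ++ ["debug_path"] else indicators
  let indicators := if ([".bak", ".sql", ".tar", ".zip", ".backup"]).any (fun x => PySem.Str.endswith path_lower x) then indicators ++ ["backup_file"] else indicators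
  let indicators := if ([".git", ".svn", ".hg"]).any (fun x => PySem.Str.isIn x path_lower) then indicators ++ ["vcs_path"] else indicators
  indicators

-- ===== PORT B =====
-- flat keyword → tag index (Source B's _KEYWORD_INDEX, already flattened there by a comprehension)
def pvKeywordIndex : List (String × String) :=
  [("admin", "admin_path"), ("administrator", "admin_path"), ("wp-admin", "admin_path"),
   ("manager", "admin_path"), ("console", "admin_path"), ("dashboard", "admin_path"),
   ("upload", "file_access_path"), ("file", "file_access_path"), ("attachment", "file_access_path"),
   ("media", "file_access_path"), ("content", "file_access_path"),
   ("/api/", "api_path"), ("/v1/", "api_path"), ("/v2/", "api_path"), ("/v3/", "api_path"),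
   ("/graphql", "api_path"),
   ("login", "auth_path"), ("signin", "auth_path"), ("auth", "auth_path"),
   ("authenticate", "auth_path"), ("register", "auth_path"), ("password", "auth_path"),
   (".env", "config_path"), ("config", "config_path"), ("settings", "config_path"),
   ("database", "config_path"), ("wp-config", "config_path"),
   ("wp-content", "wordpress_path"), ("wp-includes", "wordpress_path"),
   ("wp-json", "wordpress_path"), ("wp-admin", "wordpress_path"),
   ("debug", "debug_path"), ("test", "debug_path"), ("dev", "debug_path"),
   ("staging", "debug_path"), ("temp", "debug_path"), ("tmp", "debug_path"),
   (".git", "vcs_path"), (".svn", "vcs_path"), (".hg", "vcs_path")]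

def pvSuffixIndex : List (String × String) :=
  [(".bak", "backup_file"), (".sql", "backup_file"), (".tar", "backup_file"),
   (".zip", "backup_file"), (".backup", "backup_file")]

def pvOrder : List String :=
  ["admin_path", "file_access_path", "api_path", "auth_path", "config_path",
   "wordpress_path", "debug_path", "backup_file", "vcs_path"]

def extract_path_indicators_py_alt (path : String) : List String :=
  let p := PySem.Str.lower path
  -- p.startswith(kw, j) with 0 ≤ j is exactly: kw is a prefix of p[j:]
  let matched : PySem.Set String :=
    (List.range p.toList.length).foldl (fun m j =>
      pvKeywordIndex.foldl (fun m kt =>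
        if PySem.Chars.startswith (p.toList.drop j) kt.1.toList then PySem.Set.add m kt.2 else m) m)
      PySem.Set.empty
  let matched :=
    pvSuffixIndex.foldl (fun m kt =>
      if PySem.Str.endswith p kt.1 then PySem.Set.add m kt.2 else m) matched
  pvOrder.filter (fun t => PySem.Set.contains matched t)

-- ===== PRECONDITION & SPEC =====
def Spec_extract_path_indicators_py (path : String) (out : List String) : Prop := out = extract_path_indicators_py_alt path
instance (path : String) (out : List String) : Decidable (Spec_extract_path_indicators_py path out) := by unfold Spec_extract_path_indicators_py; infer_instance

-- ===== CLAIM (what is proved, stated in full; the proofs are below) =====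
def Claim_equal_extract_path_indicators_py : Prop := ∀ (path : String), Dom_extract_path_indicators_py path → Spec_extract_path_indicators_py path (extract_path_indicators_py path)

-- ===== LEMMAS AND PROOFS =====

-- Membership in a fold that conditionally adds tags to a set.
theorem pv_mem_foldl_cond_add {α : Type} (l : List α) (p : α → Bool) (f : α → String)
    (m0 : PySem.Set String) (x : String) :
    (x ∈ l.foldl (fun m e => if p e then PySem.Set.add m (f e) else m) m0) ↔
      x ∈ m0 ∨ ∃ e ∈ l, p e = true ∧ f e = x := by
  induction l generalizing m0 with
  | nil => simp
  | cons a t ih =>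
    simp only [List.foldl_cons, ih, List.mem_cons]
    by_cases h : p a = true
    · rw [if_pos h]
      simp only [PySem.Set.mem_add]
      constructor
      · rintro ((h1 | h2) | ⟨e, he, hrest⟩)
        · exact Or.inl h1
        · exact Or.inr ⟨a, Or.inl rfl, h, h2.symm⟩
        · exact Or.inr ⟨e, Or.inr he, hrest⟩
      · rintro (h1 | ⟨e, (rfl | he), hp, hf⟩)
        · exact Or.inl (Or.inl h1)
        · exact Or.inl (Or.inr hf.symm)
        · exact Or.inr ⟨e, he, hp, hf⟩
    · rw [if_neg h]
      constructor
      · rintro (h1 | ⟨e, he, hrest⟩)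
        · exact Or.inl h1
        · exact Or.inr ⟨e, Or.inr he, hrest⟩
      · rintro (h1 | ⟨e, (rfl | he), hp, hf⟩)
        · exact Or.inl h1
        · exact absurd hp h
        · exact Or.inr ⟨e, he, hp, hf⟩

-- Membership in the nested position × keyword scan.
theorem pv_mem_foldl2 {α β : Type} (l1 : List α) (l2 : List β) (c : α → β → Bool)
    (f : β → String) (m0 : PySem.Set String) (x : String) :
    (x ∈ l1.foldl (fun m a => l2.foldl (fun m b => if c a b then PySem.Set.add m (f b) else m) m) m0) ↔
      x ∈ m0 ∨ ∃ a ∈ l1, ∃ b ∈ l2, c a b = true ∧ f b = x := by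
  induction l1 generalizing m0 with
  | nil => simp
  | cons a t ih =>
    simp only [List.foldl_cons, ih, pv_mem_foldl_cond_add, List.mem_cons]
    constructor
    · rintro ((h1 | ⟨b, hb, hc, hf⟩) | ⟨a', ha', hrest⟩)
      · exact Or.inl h1
      · exact Or.inr ⟨a, Or.inl rfl, b, hb, hc, hf⟩
      · exact Or.inr ⟨a', Or.inr ha', hrest⟩
    · rintro (h1 | ⟨a', (rfl | ha'), hrest⟩)
      · exact Or.inl (Or.inl h1)
      · exact Or.inl (Or.inr hrest)
      · exact Or.inr ⟨a', ha', hrest⟩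

-- A bounded position scan finds a (nonempty) keyword iff 'kw in p'.
theorem pv_exists_range_startswith (p kw : List Char) (h : kw ≠ []) :
    (∃ j ∈ List.range p.length, PySem.Chars.startswith (p.drop j) kw = true) ↔
      PySem.Chars.isIn kw p = true := by
  rw [← PySem.Chars.exists_prefix_drop_iff_isIn]
  simp only [PySem.Chars.startswith_iff, List.mem_range]
  constructor
  · rintro ⟨j, _, hj⟩; exact ⟨j, hj⟩
  · rintro ⟨j, hj⟩
    by_cases hlt : j < p.length
    · exact ⟨j, hlt, hj⟩
    · exfalso
      rw [List.drop_eq_nil_of_le (le_of_not_gt hlt)] at hj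
      exact h (List.prefix_nil.mp hj)

-- Swapping the scan's position/keyword quantifiers: the scan hits keyword kt somewhere iff 'kt.1 in p'.
theorem pv_scan_iff (p : List Char) (idx : List (String × String))
    (hne : ∀ kt ∈ idx, kt.1.toList ≠ []) (x : String) :
    (∃ j ∈ List.range p.length, ∃ kt ∈ idx,
        PySem.Chars.startswith (p.drop j) kt.1.toList = true ∧ kt.2 = x) ↔
      (∃ kt ∈ idx, PySem.Chars.isIn kt.1.toList p = true ∧ kt.2 = x) := by
  constructor
  · rintro ⟨j, hj, kt, hkt, hs, hf⟩
    exact ⟨kt, hkt, (pv_exists_range_startswith p _ (hne kt hkt)).mp ⟨j, hj, hs⟩, hf⟩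
  · rintro ⟨kt, hkt, hin, hf⟩
    obtain ⟨j, hj, hs⟩ := (pv_exists_range_startswith p _ (hne kt hkt)).mpr hin
    exact ⟨j, hj, kt, hkt, hs, hf⟩

-- The matched set of B, as the port builds it.
def pvMatched (p : String) : PySem.Set String :=
  pvSuffixIndex.foldl (fun m kt =>
      if PySem.Str.endswith p kt.1 then PySem.Set.add m kt.2 else m)
    ((List.range p.toList.length).foldl (fun m j =>
        pvKeywordIndex.foldl (fun m kt =>
          if PySem.Chars.startswith (p.toList.drop j) kt.1.toList then PySem.Set.add m kt.2 else m) m)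
      PySem.Set.empty)

theorem pv_alt_eq (path : String) :
    extract_path_indicators_py_alt path =
      pvOrder.filter (fun t => PySem.Set.contains (pvMatched (PySem.Str.lower path)) t) := rfl

theorem pv_contains_matched (p : String) (t : String) :
    PySem.Set.contains (pvMatched p) t = true ↔
      ((∃ kt ∈ pvSuffixIndex, PySem.Str.endswith p kt.1 = true ∧ kt.2 = t) ∨
        (∃ kt ∈ pvKeywordIndex, PySem.Chars.isIn kt.1.toList p.toList = true ∧ kt.2 = t)) := by
  rw [PySem.Set.contains_iff]
  unfold pvMatched
  rw [pv_mem_foldl_cond_add, pv_mem_foldl2,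
    pv_scan_iff p.toList pvKeywordIndex (by decide) t]
  simp [PySem.Set.empty, or_comm]

theorem pv_tag_admin (p : String) :
    PySem.Set.contains (pvMatched p) "admin_path" =
      (["admin", "administrator", "wp-admin", "manager", "console", "dashboard"]).any (fun x => PySem.Str.isIn x p) := by
  rw [Bool.eq_iff_iff, pv_contains_matched]
  simp [pvSuffixIndex, pvKeywordIndex]

theorem pv_tag_file (p : String) :
    PySem.Set.contains (pvMatched p) "file_access_path" =
      (["upload", "file", "attachment", "media", "content"]).any (fun x => PySem.Str.isIn x p) := by
  rw [Bool.eq_iff_iff, pv_contains_matched]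
  simp [pvSuffixIndex, pvKeywordIndex]

theorem pv_tag_api (p : String) :
    PySem.Set.contains (pvMatched p) "api_path" =
      (["/api/", "/v1/", "/v2/", "/v3/", "/graphql"]).any (fun x => PySem.Str.isIn x p) := by
  rw [Bool.eq_iff_iff, pv_contains_matched]
  simp [pvSuffixIndex, pvKeywordIndex]

theorem pv_tag_auth (p : String) :
    PySem.Set.contains (pvMatched p) "auth_path" =
      (["login", "signin", "auth", "authenticate", "register", "password"]).any (fun x => PySem.Str.isIn x p) := by
  rw [Bool.eq_iff_iff, pv_contains_matched]
  simp [pvSuffixIndex, pvKeywordIndex]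

theorem pv_tag_config (p : String) :
    PySem.Set.contains (pvMatched p) "config_path" =
      ([".env", "config", "settings", "database", "wp-config"]).any (fun x => PySem.Str.isIn x p) := by
  rw [Bool.eq_iff_iff, pv_contains_matched]
  simp [pvSuffixIndex, pvKeywordIndex]

theorem pv_tag_wp (p : String) :
    PySem.Set.contains (pvMatched p) "wordpress_path" =
      (["wp-content", "wp-includes", "wp-json", "wp-admin"]).any (fun x => PySem.Str.isIn x p) := by
  rw [Bool.eq_iff_iff, pv_contains_matched]
  simp [pvSuffixIndex, pvKeywordIndex]

theorem pv_tag_debug (p : String) :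
    PySem.Set.contains (pvMatched p) "debug_path" =
      (["debug", "test", "dev", "staging", "temp", "tmp"]).any (fun x => PySem.Str.isIn x p) := by
  rw [Bool.eq_iff_iff, pv_contains_matched]
  simp [pvSuffixIndex, pvKeywordIndex]

theorem pv_tag_backup (p : String) :
    PySem.Set.contains (pvMatched p) "backup_file" =
      ([".bak", ".sql", ".tar", ".zip", ".backup"]).any (fun x => PySem.Str.endswith p x) := by
  rw [Bool.eq_iff_iff, pv_contains_matched]
  simp [pvSuffixIndex, pvKeywordIndex]

theorem pv_tag_vcs (p : String) :
    PySem.Set.contains (pvMatched p) "vcs_path" =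
      ([".git", ".svn", ".hg"]).any (fun x => PySem.Str.isIn x p) := by
  rw [Bool.eq_iff_iff, pv_contains_matched]
  simp [pvSuffixIndex, pvKeywordIndex]

-- Flattens A's conditional append: 'if c then l ++ [t] else l' is 'l ++ (if c then [t] else [])'.
theorem pv_ite_append_step (c : Prop) [Decidable c] (l : List String) (t : String) :
    (if c then l ++ [t] else l) = l ++ (if c then [t] else []) := by
  split_ifs <;> simp

-- ===== VERDICT (by name: the statement is the Claim_ definition above) =====
theorem extract_path_indicators_py_spec : Claim_equal_extract_path_indicators_py := by
  intro path _
  unfold Spec_extract_path_indicators_py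
  rw [pv_alt_eq]
  unfold extract_path_indicators_py
  simp only [pv_ite_append_step, pvOrder, List.filter_cons, List.filter_nil,
    pv_tag_admin, pv_tag_file, pv_tag_api, pv_tag_auth, pv_tag_config, pv_tag_wp,
    pv_tag_debug, pv_tag_backup, pv_tag_vcs]
  generalize (List.any ["admin", "administrator", "wp-admin", "manager", "console", "dashboard"] (fun x => PySem.Str.isIn x (PySem.Str.lower path))) = b1
  generalize (List.any ["upload", "file", "attachment", "media", "content"] (fun x => PySem.Str.isIn x (PySem.Str.lower path))) = b2
  generalize (List.any ["/api/", "/v1/", "/v2/", "/v3/", "/graphql"] (fun x => PySem.Str.isIn x (PySem.Str.lower path))) = b3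
  generalize (List.any ["login", "signin", "auth", "authenticate", "register", "password"] (fun x => PySem.Str.isIn x (PySem.Str.lower path))) = b4
  generalize (List.any [".env", "config", "settings", "database", "wp-config"] (fun x => PySem.Str.isIn x (PySem.Str.lower path))) = b5
  generalize (List.any ["wp-content", "wp-includes", "wp-json", "wp-admin"] (fun x => PySem.Str.isIn x (PySem.Str.lower path))) = b6
  generalize (List.any ["debug", "test", "dev", "staging", "temp", "tmp"] (fun x => PySem.Str.isIn x (PySem.Str.lower path))) = b7
  generalize (List.any [".bak", ".sql", ".tar", ".zip", ".backup"] (fun x => PySem.Str.endswith (PySem.Str.lower path) x)) = b8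
  generalize (List.any [".git", ".svn", ".hg"] (fun x => PySem.Str.isIn x (PySem.Str.lower path))) = b9
  cases b1 <;> cases b2 <;> cases b3 <;> cases b4 <;> cases b5 <;> cases b6 <;> cases b7 <;> cases b8 <;> cases b9 <;> rfl
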